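-- pv_equiv track=rewrite | github.com/Leonenkk/AOIS | lab1/main.py | binary_subtract
-- ===== SOURCE A (Python) =====
-- def binary_subtract(a, b):
--     """
--     Вычитание b из a (a >= b) для двоичных чисел в виде строк (без знака).
--     Возвращает результат в виде строки.
--     """
--     max_len = max(len(a), len(b))
--     a = a.zfill(max_len)
--     b = b.zfill(max_len)
--     result = ""
--     borrow = 0
--     for i in range(max_len - 1, -1, -1):
--         diff = (1 if a[i] == '1' else 0) - (1 if b[i] == '1' else 0) - borrow
--         if diff < 0:
--             diff += 2
--             borrow = 1
--         else:
--             borrow = 0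
--         result = ('1' if diff == 1 else '0') + result
--     result = result.lstrip('0')
--     return result if result != "" else "0"
-- ===== SOURCE B (Python) =====
-- def binary_subtract(a, b):
--     va = 0
--     for c in a:
--         va = va * 2 + (1 if c == '1' else 0)
--     vb = 0
--     for c in b:
--         vb = vb * 2 + (1 if c == '1' else 0)
--     n = max(len(a), len(b))
--     d = (va - vb) % (2 ** n)
--     return bin(d)[2:]
-- ===== Notes on version B (the rewrite author's own statement) =====
-- stated objective: faster
-- what changed: Replaces the digit-by-digit borrow loop over zero-filled strings (with quadratic string prepending) by integer conversion, one modular subtraction (va - vb) mod 2^n, and bin() formatting.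
import Mathlib
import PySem

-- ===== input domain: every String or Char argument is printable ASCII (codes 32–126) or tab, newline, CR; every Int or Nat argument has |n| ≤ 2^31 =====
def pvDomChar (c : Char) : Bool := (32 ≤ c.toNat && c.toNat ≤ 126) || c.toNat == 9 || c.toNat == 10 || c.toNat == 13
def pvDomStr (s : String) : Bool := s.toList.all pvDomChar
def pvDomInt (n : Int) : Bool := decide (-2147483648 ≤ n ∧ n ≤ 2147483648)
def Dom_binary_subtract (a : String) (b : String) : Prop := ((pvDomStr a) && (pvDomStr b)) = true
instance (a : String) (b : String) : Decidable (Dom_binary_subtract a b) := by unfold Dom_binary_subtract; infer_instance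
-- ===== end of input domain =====

-- B replaces A's per-digit borrow loop over zero-filled strings by integer conversion, (va-vb) mod 2^n, and binary formatting (measurably faster).

-- ===== PORT A =====
-- a[i] == '1' contributes 1, any other character 0
def pvBit (c : Char) : Int := if c = '1' then 1 else 0

-- the for-loop 'for i in range(max_len-1, -1, -1)' walks both equal-length padded
-- strings from the last character to the first: transcribed as a recursion over
-- their reverses with the same state (result, borrow), prepending each digit.
def pvBorrowLoop : List Char → List Char → Int → List Char → List Char
  | ca :: ra, cb :: rb, borrow, result =>
      let diff := pvBit ca - pvBit cb - borrow
      if diff < 0 then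
        pvBorrowLoop ra rb 1 ((if diff + 2 = 1 then '1' else '0') :: result)
      else
        pvBorrowLoop ra rb 0 ((if diff = 1 then '1' else '0') :: result)
  | _, _, _, result => result

def binary_subtract (a : String) (b : String) : String :=
  let max_len : Nat := max a.toList.length b.toList.length
  let za := PySem.Chars.zfill a.toList (max_len : Int)
  let zb := PySem.Chars.zfill b.toList (max_len : Int)
  let res := pvBorrowLoop za.reverse zb.reverse 0 []
  -- result.lstrip('0') — exact: drops exactly the leading '0' characters
  let stripped := res.dropWhile (· == '0')
  if stripped = [] then "0" else String.mk stripped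

-- ===== PORT B =====
-- bin(d)[2:] for d > 0: binary digits of d, most significant first, no leading zeros
def pvBin : Nat → List Char
  | 0 => []
  | v + 1 => pvBin ((v + 1) / 2) ++ [if (v + 1) % 2 = 1 then '1' else '0']
decreasing_by exact Nat.div_lt_self (Nat.succ_pos v) (by omega)

def binary_subtract_alt (a : String) (b : String) : String :=
  let va := a.toList.foldl (fun v c => v * 2 + (if c = '1' then (1 : Int) else 0)) 0
  let vb := b.toList.foldl (fun v c => v * 2 + (if c = '1' then (1 : Int) else 0)) 0
  let n : Nat := max a.toList.length b.toList.length
  let d := PySem.Int.mod (va - vb) ((2 : Int) ^ n)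
  -- bin(d)[2:]; bin(0)[2:] = "0"
  String.mk (if d = 0 then ['0'] else pvBin d.toNat)

-- ===== PRECONDITION & SPEC =====
def Spec_binary_subtract (a : String) (b : String) (out : String) : Prop := out = binary_subtract_alt a b
instance (a : String) (b : String) (out : String) : Decidable (Spec_binary_subtract a b out) := by unfold Spec_binary_subtract; infer_instance

-- ===== CLAIM (what is proved, stated in full; the proofs are below) =====
def Claim_equal_binary_subtract : Prop := ∀ (a : String) (b : String), Dom_binary_subtract a b → Spec_binary_subtract a b (binary_subtract a b)

-- ===== LEMMAS AND PROOFS =====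

-- value of a bit list read LSB-first
def pvValR : List Char → Int
  | [] => 0
  | c :: r => pvBit c + 2 * pvValR r

-- fixed-width binary digits of v, most significant first
def pvW : Nat → Nat → List Char
  | _, 0 => []
  | v, k + 1 => pvW (v / 2) k ++ [if v % 2 = 1 then '1' else '0']

theorem pvBit_cases (c : Char) : pvBit c = 0 ∨ pvBit c = 1 := by
  unfold pvBit; split <;> simp

theorem pv_modsplit (d Y P : Int) (hP : 0 < P) (hd : d = 0 ∨ d = 1) :
    (d + 2 * Y) % (2 * P) = d + 2 * (Y % P) := by
  have h1 : Y % P = Y - P * (Y / P) := by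
    have := Int.ediv_add_emod Y P; omega
  have h2 : d + 2 * Y = (d + 2 * (Y % P)) + (2 * P) * (Y / P) := by rw [h1]; ring
  have h3 : 0 ≤ Y % P := Int.emod_nonneg Y (by omega)
  have h4 : Y % P < P := Int.emod_lt_of_pos Y hP
  rw [h2, Int.add_mul_emod_self_left, Int.emod_eq_of_lt (by omega) (by omega)]

theorem pv_loop_eq : ∀ (as bs : List Char), as.length = bs.length →
    ∀ (borrow : Int), (borrow = 0 ∨ borrow = 1) → ∀ (acc : List Char),
    pvBorrowLoop as bs borrow acc =
      pvW ((pvValR as - pvValR bs - borrow) % (2 : Int) ^ as.length).toNat as.length ++ acc := by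
  intro as
  induction as with
  | nil =>
      intro bs _ borrow _ acc
      simp [pvBorrowLoop, pvW, pvValR]
  | cons ca ra ih =>
      intro bs hlen borrow hb acc
      cases bs with
      | nil => simp at hlen
      | cons cb rb =>
        have hlen' : ra.length = rb.length := by simpa using hlen
        have hca := pvBit_cases ca
        have hcb := pvBit_cases cb
        -- adjusted digit and next borrow
        set diff0 : Int := pvBit ca - pvBit cb - borrow with hdiff0
        set borrow' : Int := if diff0 < 0 then 1 else 0 with hb'
        set diff : Int := diff0 + 2 * borrow' with hdiff
        have hb'01 : borrow' = 0 ∨ borrow' = 1 := by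
          rw [hb']; split <;> simp
        have hdiff01 : diff = 0 ∨ diff = 1 := by
          rw [hdiff, hb']; split <;> omega
        set X : Int := pvValR ra - pvValR rb - borrow' with hX
        have hsplit : pvValR (ca :: ra) - pvValR (cb :: rb) - borrow = diff + 2 * X := by
          simp only [pvValR]; rw [hdiff, hX, hdiff0]; ring
        have hP : (0 : Int) < (2 : Int) ^ ra.length := by positivity
        have hmod : (pvValR (ca :: ra) - pvValR (cb :: rb) - borrow) % (2 : Int) ^ (ca :: ra).length
            = diff + 2 * (X % (2 : Int) ^ ra.length) := by
          rw [hsplit]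
          have : ((2 : Int) ^ (ca :: ra).length) = 2 * (2 : Int) ^ ra.length := by
            simp [List.length_cons, pow_succ]; ring
          rw [this, pv_modsplit diff X _ hP hdiff01]
        have hr0 : 0 ≤ X % (2 : Int) ^ ra.length := Int.emod_nonneg X (by omega)
        set m : Nat := (X % (2 : Int) ^ ra.length).toNat with hm
        have hV : ((pvValR (ca :: ra) - pvValR (cb :: rb) - borrow) % (2 : Int) ^ (ca :: ra).length).toNat
            = diff.toNat + 2 * m := by
          rw [hmod, hm]; omega
        have hdig : (if (diff.toNat + 2 * m) % 2 = 1 then '1' else '0')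
            = (if diff = 1 then '1' else '0') := by
          rcases hdiff01 with h | h <;> simp [h, Nat.add_mul_mod_self_left]
        have hdiv : (diff.toNat + 2 * m) / 2 = m := by omega
        have hW : pvW ((pvValR (ca :: ra) - pvValR (cb :: rb) - borrow) % (2 : Int) ^ (ca :: ra).length).toNat (ca :: ra).length
            = pvW m ra.length ++ [if diff = 1 then '1' else '0'] := by
          rw [hV]; simp only [List.length_cons, pvW, hdiv, hdig]
        rw [hW]
        -- evaluate one step of the loop
        by_cases hneg : diff0 < 0
        · have hbeq : borrow' = 1 := by rw [hb']; simp [hneg]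
          have hdeq : diff = diff0 + 2 := by rw [hdiff, hbeq]; ring
          have : pvBorrowLoop (ca :: ra) (cb :: rb) borrow acc
              = pvBorrowLoop ra rb 1 ((if diff0 + 2 = 1 then '1' else '0') :: acc) := by
            simp only [pvBorrowLoop, ← hdiff0]
            rw [if_pos hneg]
          rw [this, ih rb hlen' 1 (Or.inr rfl)]
          rw [hX, hbeq] at hm
          rw [← hdeq, hm]
          simp
        · have hbeq : borrow' = 0 := by rw [hb']; simp [hneg]
          have hdeq : diff = diff0 := by rw [hdiff, hbeq]; ring
          have : pvBorrowLoop (ca :: ra) (cb :: rb) borrow acc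
              = pvBorrowLoop ra rb 0 ((if diff0 = 1 then '1' else '0') :: acc) := by
            simp only [pvBorrowLoop, ← hdiff0]
            rw [if_neg hneg]
          rw [this, ih rb hlen' 0 (Or.inl rfl)]
          rw [hX, hbeq] at hm
          rw [← hdeq, hm]
          simp

-- pvValR of an append
theorem pvValR_append : ∀ (x y : List Char), pvValR (x ++ y) = pvValR x + 2 ^ x.length * pvValR y := by
  intro x
  induction x with
  | nil => intro y; simp [pvValR]
  | cons c r ih => intro y; simp [pvValR, ih, pow_succ]; ring

theorem pvValR_replicate (k : Nat) : pvValR (List.replicate k '0') = 0 := by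
  induction k with
  | zero => simp [pvValR]
  | succ n ih => simp [List.replicate_succ, pvValR, ih, pvBit]

-- the MSB-first fold of B equals pvValR of the reverse
theorem pv_fold_eq : ∀ (l : List Char) (acc : Int),
    l.foldl (fun v c => v * 2 + (if c = '1' then (1 : Int) else 0)) acc
      = acc * 2 ^ l.length + pvValR l.reverse := by
  intro l
  induction l with
  | nil => intro acc; simp [pvValR]
  | cons c r ih =>
      intro acc
      simp only [List.foldl_cons, List.reverse_cons, List.length_cons]
      rw [ih, pvValR_append]
      by_cases h : c = '1' <;> simp [pvValR, pvBit, h, pow_succ] <;> ring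

theorem pvValR_zeros_suffix (x : List Char) (k : Nat) :
    pvValR (x ++ List.replicate k '0') = pvValR x := by
  rw [pvValR_append, pvValR_replicate]; ring

theorem pvValR_zerobit_suffix (x : List Char) (c : Char) (h : pvBit c = 0) :
    pvValR (x ++ [c]) = pvValR x := by
  rw [pvValR_append]; simp [pvValR, h]

-- zero-filling does not change the value
theorem pv_zfill_val (l : List Char) (w : Int) :
    pvValR (PySem.Chars.zfill l w).reverse = pvValR l.reverse := by
  unfold PySem.Chars.zfill
  split
  · rfl
  · split
    · split
      · rename_i c rest hw h
        have hc : pvBit c = 0 := by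
          rcases h with h | h <;> rw [h] <;> decide
        simp only [List.reverse_cons, List.reverse_append, List.reverse_replicate]
        rw [pvValR_zerobit_suffix _ _ hc, pvValR_zeros_suffix,
            pvValR_zerobit_suffix _ _ hc]
      · simp only [List.reverse_append, List.reverse_replicate]
        rw [pvValR_zeros_suffix]
    · simp [List.reverse_replicate, pvValR_replicate, pvValR]

theorem pvBin_pos (v : Nat) (h : v ≠ 0) :
    pvBin v = pvBin (v / 2) ++ [if v % 2 = 1 then '1' else '0'] := by
  cases v with
  | zero => omega
  | succ n => rw [pvBin]

theorem pvBin_eq_nil_iff (v : Nat) : pvBin v = [] ↔ v = 0 := by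
  constructor
  · intro h
    by_contra hv
    rw [pvBin_pos v hv] at h
    simp at h
  · intro h; subst h; rw [pvBin]

theorem pv_strip_W : ∀ (k v : Nat), v < 2 ^ k →
    (pvW v k).dropWhile (· == '0') = pvBin v := by
  intro k
  induction k with
  | zero =>
      intro v hv
      have : v = 0 := by omega
      subst this
      simp [pvW, pvBin]
  | succ n ih =>
      intro v hv
      have hv2 : v / 2 < 2 ^ n := by
        have h2 : (2:Nat) ^ (n+1) = 2 ^ n * 2 := by ring
        omega
      simp only [pvW, List.dropWhile_append, ih _ hv2]
      by_cases h0 : v = 0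
      · subst h0; simp [pvBin]
      · rw [pvBin_pos v h0]
        by_cases h1 : v / 2 = 0
        · have : v = 1 := by omega
          subst this
          simp [pvBin, List.dropWhile]
        · have : pvBin (v / 2) ≠ [] := fun hh => h1 ((pvBin_eq_nil_iff _).mp hh)
          simp [List.isEmpty_iff, this]

-- ===== VERDICT (by name: the statement is the Claim_ definition above) =====
theorem binary_subtract_spec : Claim_equal_binary_subtract := by
  intro a b _
  unfold Spec_binary_subtract
  simp only [binary_subtract, binary_subtract_alt]
  set la := a.toList with hla
  set lb := b.toList with hlb
  set n : Nat := max la.length lb.length with hn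
  have hzalen : (PySem.Chars.zfill la (n : Int)).length = n := by
    rw [PySem.Chars.length_zfill]; omega
  have hzblen : (PySem.Chars.zfill lb (n : Int)).length = n := by
    rw [PySem.Chars.length_zfill]; omega
  have hlen : (PySem.Chars.zfill la (n : Int)).reverse.length
      = (PySem.Chars.zfill lb (n : Int)).reverse.length := by
    simp [hzalen, hzblen]
  set va := la.foldl (fun v c => v * 2 + (if c = '1' then (1 : Int) else 0)) 0 with hva
  set vb := lb.foldl (fun v c => v * 2 + (if c = '1' then (1 : Int) else 0)) 0 with hvb
  have hva' : va = pvValR la.reverse := by rw [hva, pv_fold_eq]; ring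
  have hvb' : vb = pvValR lb.reverse := by rw [hvb, pv_fold_eq]; ring
  have hP : (0 : Int) < (2 : Int) ^ n := by positivity
  set d : Int := (va - vb) % (2 : Int) ^ n with hd
  have hmodeq : PySem.Int.mod (va - vb) ((2 : Int) ^ n) = d := by
    rw [PySem.Int.mod_eq_emod_of_pos hP, hd]
  have hloop : pvBorrowLoop (PySem.Chars.zfill la (n : Int)).reverse
      (PySem.Chars.zfill lb (n : Int)).reverse 0 [] = pvW d.toNat n := by
    rw [pv_loop_eq _ _ hlen 0 (Or.inl rfl) []]
    rw [pv_zfill_val, pv_zfill_val]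
    simp only [List.length_reverse, hzalen]
    rw [← hva', ← hvb']
    simp [hd]
  have hd0 : 0 ≤ d := Int.emod_nonneg _ (by omega)
  have hdlt : d < (2 : Int) ^ n := Int.emod_lt_of_pos _ hP
  have hbound : d.toNat < 2 ^ n := by
    have : ((2 : Int) ^ n) = ((2 ^ n : Nat) : Int) := by push_cast; ring
    omega
  have hstrip : (pvW d.toNat n).dropWhile (· == '0') = pvBin d.toNat :=
    pv_strip_W n d.toNat hbound
  rw [hloop, hstrip, hmodeq]
  by_cases hz : d = 0
  · rw [hz]
    simp [pvBin]
    rfl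
  · have hnz : d.toNat ≠ 0 := by omega
    rw [if_neg hz, if_neg ((pvBin_eq_nil_iff d.toNat).not.mpr hnz)]
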